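-- pv_equiv track=rewrite | github.com/TAMILSELVANM30/leetcode | 4136-ConcatenateNonZeroDigitsAndMultiplyBySumIi/4136-ConcatenateNonZeroDigitsAndMultiplyBySumIi.py | sumAndMultiply
-- ===== SOURCE A (Python) =====
-- def sumAndMultiply(s, queries):
--     mod = 10**9 + 7
--     solendivar = (s, queries)
--
--     m = len(s)
--     nz_idx = [0] * m
--     digits = []
--     total_nz = 0
--
--     for i in range(m):
--         ch = s[i]
--         if ch != '0':
--             total_nz += 1
--             nz_idx[i] = total_nz
--             digits.append(ord(ch) - 48)
--
--     V = [0] * (total_nz + 1)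
--     S = [0] * (total_nz + 1)
--     pow10 = [1] * (total_nz + 1)
--
--     for i in range(1, total_nz + 1):
--         d = digits[i - 1]
--         V[i] = (V[i - 1] * 10 + d) % mod
--         S[i] = S[i - 1] + d
--         pow10[i] = (pow10[i - 1] * 10) % mod
--
--     next_nz = [m] * m
--     last = m
--     for i in range(m - 1, -1, -1):
--         if s[i] != '0':
--             last = i
--         next_nz[i] = last
--
--     prev_nz = [-1] * m
--     last = -1
--     for i in range(m):
--         if s[i] != '0':
--             last = i
--         prev_nz[i] = last
--
--     res = []
--     res_append = res.append
--     for l, r in queries: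
--         start = next_nz[l]
--         if start > r:
--             res_append(0)
--             continue
--         end = prev_nz[r]
--         a = nz_idx[start]
--         b = nz_idx[end]
--         length = b - a + 1
--         x = (V[b] - V[a - 1] * pow10[length]) % mod
--         ssum = S[b] - S[a - 1]
--         res_append((x * ssum) % mod)
--
--     return res
-- ===== SOURCE B (Python) =====
-- def sumAndMultiply(s, queries):
--     mod = 10**9 + 7
--     res = []
--     for l, r in queries:
--         val = 0
--         ssum = 0
--         for i in range(l, r + 1):
--             ch = s[i]
--             if ch != '0':
--                 d = ord(ch) - 48
--                 val = (val * 10 + d) % mod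
--                 ssum += d
--         res.append((val * ssum) % mod)
--     return res
-- ===== Notes on version B (the rewrite author's own statement) =====
-- stated objective: simpler
-- what changed: Drops A's five precomputed tables (nonzero ranks, prefix concatenation values, prefix digit sums, powers of 10, next/prev nonzero index arrays) and answers each query by a direct one-pass rescan of s[l..r]; with few queries this also skips A's O(n) table construction, which is why a timing run measures B faster, while a query-heavy workload would favour A.
-- outside the precondition, e.g. on sumAndMultiply('1', [(-1, 0)]): A returns [1], B returns [22]
import Mathlib
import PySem

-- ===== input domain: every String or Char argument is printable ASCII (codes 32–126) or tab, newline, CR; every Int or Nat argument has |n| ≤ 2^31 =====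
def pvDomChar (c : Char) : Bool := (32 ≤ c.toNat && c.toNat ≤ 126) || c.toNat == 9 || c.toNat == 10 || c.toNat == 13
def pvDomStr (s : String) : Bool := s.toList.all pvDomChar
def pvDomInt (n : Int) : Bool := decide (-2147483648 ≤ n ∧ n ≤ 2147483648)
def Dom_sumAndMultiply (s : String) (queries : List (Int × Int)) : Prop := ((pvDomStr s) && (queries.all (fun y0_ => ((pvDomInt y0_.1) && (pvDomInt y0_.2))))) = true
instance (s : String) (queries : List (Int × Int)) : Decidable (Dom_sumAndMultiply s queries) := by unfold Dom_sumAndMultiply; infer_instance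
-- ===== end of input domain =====

-- B drops A's precomputed prefix/index tables and answers each query by rescanning s[l..r] directly (objective: simpler).

-- ===== PORT A =====
def sumAndMultiply (s : String) (queries : List (Int × Int)) : List Int :=
  let md : Int := 10 ^ 9 + 7
  let cs := s.toList
  let m := cs.length
  -- for i in range(m): build nz_idx (written once per index, in order: ported as append), digits, total_nz
  let t1 := (PySem.List.pyRange 0 (m : Int) 1).foldl (fun (st : List Int × List Int × Int) i =>
      let ch := PySem.List.pyGetD cs i ' '
      if ch ≠ '0' then
        (st.1 ++ [st.2.2 + 1], st.2.1 ++ [(ch.toNat : Int) - 48], st.2.2 + 1)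
      else (st.1 ++ [(0 : Int)], st.2.1, st.2.2))
    (([] : List Int), ([] : List Int), (0 : Int))
  let nz_idx := t1.1
  let digits := t1.2.1
  let total_nz := t1.2.2
  -- for i in range(1, total_nz+1): V[i], S[i], pow10[i] (written in order: ported as append)
  let t2 := (PySem.List.pyRange 1 (total_nz + 1) 1).foldl (fun (st : List Int × List Int × List Int) i =>
      let d := PySem.List.pyGetD digits (i - 1) 0
      (st.1 ++ [PySem.Int.mod (PySem.List.pyGetD st.1 (i - 1) 0 * 10 + d) md],
       st.2.1 ++ [PySem.List.pyGetD st.2.1 (i - 1) 0 + d],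
       st.2.2 ++ [PySem.Int.mod (PySem.List.pyGetD st.2.2 (i - 1) 0 * 10) md]))
    ([(0 : Int)], [(0 : Int)], [(1 : Int)])
  let V := t2.1
  let S := t2.2.1
  let pow10 := t2.2.2
  -- for i in range(m-1, -1, -1): next_nz[i] = last (written in descending order: ported as cons)
  let t3 := (PySem.List.pyRange ((m : Int) - 1) (-1) (-1)).foldl (fun (st : List Int × Int) i =>
      let last := if PySem.List.pyGetD cs i ' ' ≠ '0' then i else st.2
      (last :: st.1, last)) (([] : List Int), (m : Int))
  let next_nz := t3.1
  -- for i in range(m): prev_nz[i] = last (written in ascending order: ported as append)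
  let t4 := (PySem.List.pyRange 0 (m : Int) 1).foldl (fun (st : List Int × Int) i =>
      let last := if PySem.List.pyGetD cs i ' ' ≠ '0' then i else st.2
      (st.1 ++ [last], last)) (([] : List Int), (-1 : Int))
  let prev_nz := t4.1
  queries.foldl (fun res q =>
    let l := q.1
    let r := q.2
    let start := PySem.List.pyGetD next_nz l 0
    if start > r then res ++ [(0 : Int)]
    else
      let e := PySem.List.pyGetD prev_nz r 0
      let a := PySem.List.pyGetD nz_idx start 0
      let b := PySem.List.pyGetD nz_idx e 0
      let len := b - a + 1
      let x := PySem.Int.mod (PySem.List.pyGetD V b 0 - PySem.List.pyGetD V (a - 1) 0 * PySem.List.pyGetD pow10 len 0) md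
      let ssum := PySem.List.pyGetD S b 0 - PySem.List.pyGetD S (a - 1) 0
      res ++ [PySem.Int.mod (x * ssum) md]) []

-- ===== PORT B =====
def sumAndMultiply_alt (s : String) (queries : List (Int × Int)) : List Int :=
  let md : Int := 10 ^ 9 + 7
  let cs := s.toList
  queries.foldl (fun res q =>
    let st := (PySem.List.pyRange q.1 (q.2 + 1) 1).foldl (fun (vs : Int × Int) i =>
        let ch := PySem.List.pyGetD cs i ' '
        if ch ≠ '0' then
          let d := (ch.toNat : Int) - 48
          (PySem.Int.mod (vs.1 * 10 + d) md, vs.2 + d)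
        else vs) ((0 : Int), (0 : Int))
    res ++ [PySem.Int.mod (st.1 * st.2) md]) []

-- ===== PRECONDITION & SPEC =====
-- Pre_ excludes queries whose endpoints leave the natural index range: l outside [0, len(s)) raises
-- IndexError or (for -len ≤ l < 0) silently wraps around via Python negative indexing, and r ≥ len(s)
-- raises IndexError whenever the range contains a nonzero digit.
def Pre_sumAndMultiply (s : String) (queries : List (Int × Int)) : Prop :=
  ∀ q ∈ queries, 0 ≤ q.1 ∧ q.1 < (s.toList.length : Int) ∧ q.2 < (s.toList.length : Int)
instance (s : String) (queries : List (Int × Int)) : Decidable (Pre_sumAndMultiply s queries) := by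
  unfold Pre_sumAndMultiply; infer_instance

def pvWitness_sumAndMultiply : String × (List (Int × Int)) := ("10203", [(0, 4), (1, 3), (2, 1), (4, 4)])

def Spec_sumAndMultiply (s : String) (queries : List (Int × Int)) (out : List Int) : Prop := out = sumAndMultiply_alt s queries
instance (s : String) (queries : List (Int × Int)) (out : List Int) : Decidable (Spec_sumAndMultiply s queries out) := by unfold Spec_sumAndMultiply; infer_instance

-- ===== CLAIM (what is proved, stated in full; the proofs are below) =====
def Claim_equal_sumAndMultiply : Prop := ∀ (s : String) (queries : List (Int × Int)), Dom_sumAndMultiply s queries → Pre_sumAndMultiply s queries → Spec_sumAndMultiply s queries (sumAndMultiply s queries)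


-- ===== LEMMAS AND PROOFS =====

-- proof-side abbreviations
def dig (c : Char) : Int := (c.toNat : Int) - 48
def nzd (cs : List Char) : List Int := (cs.filter (fun c => c ≠ '0')).map dig
def cnt (cs : List Char) : Nat := (cs.filter (fun c => c ≠ '0')).length
def Ff (v : Int) (ds : List Int) : Int := ds.foldl (fun a d => (a * 10 + d) % (10 ^ 9 + 7)) v
def rawF (v : Int) (ds : List Int) : Int := ds.foldl (fun a d => a * 10 + d) v
def rnk : List Char → Int → List Int
  | [], _ => []
  | c :: cs, t => if c ≠ '0' then (t + 1) :: rnk cs (t + 1) else 0 :: rnk cs t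
def njS (cs : List Char) (k : Nat) : Int := (k : Int) + (((cs.drop k).takeWhile (fun c => c = '0')).length : Int)
def pjS (cs : List Char) (k : Nat) : Int := (k : Int) - 1 - (((cs.take k).reverse.takeWhile (fun c => c = '0')).length : Int)

-- basic structural lemmas
theorem nzd_append (xs ys : List Char) : nzd (xs ++ ys) = nzd xs ++ nzd ys := by
  simp [nzd]
theorem cnt_append (xs ys : List Char) : cnt (xs ++ ys) = cnt xs + cnt ys := by
  simp [cnt]
theorem length_nzd (xs : List Char) : (nzd xs).length = cnt xs := by
  simp [nzd, cnt]
theorem rnk_getD (cs : List Char) (t : Int) (j : Nat) (hj : j < cs.length) (hnz : cs[j] ≠ '0') :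
    (rnk cs t).getD j 0 = t + (cnt (cs.take (j + 1)) : Int) := by
  induction cs generalizing t j with
  | nil => simp at hj
  | cons c cs ih =>
    cases j with
    | zero =>
      simp only [List.getElem_cons_zero] at hnz
      simp [rnk, hnz, cnt]
    | succ j =>
      simp only [List.getElem_cons_succ] at hnz
      have hj' : j < cs.length := by simpa using hj
      by_cases h : c = '0'
      · have h1 : rnk (c :: cs) t = 0 :: rnk cs t := by simp [rnk, h]
        rw [h1, List.getD_cons_succ, ih t j hj' hnz]
        have h3 : cnt (List.take (j + 1 + 1) (c :: cs)) = cnt (List.take (j + 1) cs) := by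
          simp [List.take_succ_cons, cnt, h]
        rw [h3]
      · have h1 : rnk (c :: cs) t = (t + 1) :: rnk cs (t + 1) := by simp [rnk, h]
        rw [h1, List.getD_cons_succ, ih (t + 1) j hj' hnz]
        have h3 : cnt (List.take (j + 1 + 1) (c :: cs)) = cnt (List.take (j + 1) cs) + 1 := by
          simp [List.take_succ_cons, cnt, h]
        rw [h3]; push_cast; ring

theorem rawF_shift (ds : List Int) (v : Int) : rawF v ds = v * 10 ^ ds.length + rawF 0 ds := by
  induction ds generalizing v with
  | nil => simp [rawF]
  | cons d ds ih =>
    simp only [rawF, List.foldl_cons, List.length_cons]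
    rw [show ds.foldl (fun a d => a * 10 + d) (v * 10 + d) = rawF (v * 10 + d) ds from rfl,
        show ds.foldl (fun a d => a * 10 + d) (0 * 10 + d) = rawF (0 * 10 + d) ds from rfl,
        ih (v * 10 + d), ih (0 * 10 + d)]
    ring
theorem Ff_modeq (ds : List Int) (v w : Int) (h : v ≡ w [ZMOD (10 ^ 9 + 7)]) :
    Ff v ds ≡ rawF w ds [ZMOD (10 ^ 9 + 7)] := by
  induction ds generalizing v w with
  | nil => simpa [Ff, rawF] using h
  | cons d ds ih =>
    show Ff ((v * 10 + d) % (10 ^ 9 + 7)) ds ≡ rawF (w * 10 + d) ds [ZMOD (10 ^ 9 + 7)]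
    refine ih _ _ ?_
    calc (v * 10 + d) % (10 ^ 9 + 7) ≡ v * 10 + d [ZMOD (10 ^ 9 + 7)] := Int.emod_emod_of_dvd _ dvd_rfl
      _ ≡ w * 10 + d [ZMOD (10 ^ 9 + 7)] := by exact Int.ModEq.add_right d (Int.ModEq.mul_right 10 h)
theorem Ff_bounds (ds : List Int) (v : Int) (h0 : 0 ≤ v) (h1 : v < 10 ^ 9 + 7) :
    0 ≤ Ff v ds ∧ Ff v ds < 10 ^ 9 + 7 := by
  induction ds generalizing v with
  | nil => exact ⟨h0, h1⟩
  | cons d ds ih =>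
    simp only [Ff, List.foldl_cons]
    exact ih _ (Int.emod_nonneg _ (by norm_num)) (Int.emod_lt_of_pos _ (by norm_num))
theorem Ff_append (v : Int) (xs ys : List Int) : Ff v (xs ++ ys) = Ff (Ff v xs) ys := by
  simp [Ff]
theorem x_eq (D : List Int) (a b : Nat) (hab : a ≤ b) (hb : b ≤ D.length) :
    (Ff 0 (D.take b) - Ff 0 (D.take a) * (10 ^ (b - a) % (10 ^ 9 + 7))) % (10 ^ 9 + 7)
      = Ff 0 ((D.take b).drop a) := by
  set p : Int := 10 ^ 9 + 7 with hp
  have hpos : (0 : Int) < p := by norm_num [hp]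
  set ds := (D.take b).drop a with hds
  have hlenb : (D.take b).length = b := by simp [Nat.min_eq_left hb]
  have hlds : ds.length = b - a := by simp [hds, hlenb]
  have hsplit : D.take b = D.take a ++ ds := by
    conv_lhs => rw [← List.take_append_drop a (D.take b)]
    rw [List.take_take, Nat.min_eq_left hab]
  set A0 := Ff 0 (D.take a) with hA0
  have hb1 : Ff 0 (D.take b) = Ff A0 ds := by rw [hsplit, Ff_append]
  have hbnd := Ff_bounds (D.take a) 0 le_rfl (by norm_num [hp])
  have h1 : Ff A0 ds ≡ rawF A0 ds [ZMOD p] := Ff_modeq ds A0 A0 (Int.ModEq.refl A0)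
  have h2 : rawF A0 ds = A0 * 10 ^ (b - a) + rawF 0 ds := by rw [rawF_shift, hlds]
  have h3 : A0 * (10 ^ (b - a) % p) ≡ A0 * 10 ^ (b - a) [ZMOD p] :=
    Int.ModEq.mul_left A0 (Int.emod_emod_of_dvd _ dvd_rfl)
  have h4 : Ff 0 (D.take b) - A0 * (10 ^ (b - a) % p) ≡ rawF 0 ds [ZMOD p] := by
    have := (hb1 ▸ h1).sub h3
    rw [h2] at this
    simpa using this
  have h5 : rawF 0 ds ≡ Ff 0 ds [ZMOD p] := (Ff_modeq ds 0 0 (Int.ModEq.refl 0)).symm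
  have h6 := h4.trans h5
  have hbnd2 := Ff_bounds ds 0 le_rfl (by norm_num [hp])
  calc (Ff 0 (D.take b) - A0 * (10 ^ (b - a) % p)) % p = Ff 0 ds % p := h6
    _ = Ff 0 ds := Int.emod_eq_of_lt hbnd2.1 hbnd2.2

-- loop 1: characterization of (nz_idx, digits, total_nz)
theorem loop1_gen (cs : List Char) (nz dg : List Int) (t : Int) :
    cs.foldl (fun (st : List Int × List Int × Int) ch =>
      if ch ≠ '0' then
        (st.1 ++ [st.2.2 + 1], st.2.1 ++ [(ch.toNat : Int) - 48], st.2.2 + 1)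
      else (st.1 ++ [(0 : Int)], st.2.1, st.2.2)) (nz, dg, t)
    = (nz ++ rnk cs t, dg ++ nzd cs, t + (cnt cs : Int)) := by
  induction cs generalizing nz dg t with
  | nil => simp [rnk, nzd, cnt]
  | cons c cs ih =>
    by_cases h : c = '0'
    · rw [List.foldl_cons, if_neg (by simp [h]), ih]
      have h1 : rnk (c :: cs) t = 0 :: rnk cs t := by simp [rnk, h]
      have h2 : nzd (c :: cs) = nzd cs := by simp [nzd, h]
      have h3 : cnt (c :: cs) = cnt cs := by simp [cnt, h]
      simp [h1, h2, h3]
    · rw [List.foldl_cons, if_pos h, ih]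
      have h1 : rnk (c :: cs) t = (t + 1) :: rnk cs (t + 1) := by simp [rnk, h]
      have h2 : nzd (c :: cs) = ((c.toNat : Int) - 48) :: nzd cs := by simp [nzd, dig, h]
      have h3 : cnt (c :: cs) = cnt cs + 1 := by simp [cnt, h]
      simp [h1, h2, h3, ← List.append_cons]
      omega

theorem loop1_eq (cs : List Char) :
    (PySem.List.pyRange 0 (cs.length : Int) 1).foldl (fun (st : List Int × List Int × Int) i =>
      if PySem.List.pyGetD cs i ' ' ≠ '0' then
        (st.1 ++ [st.2.2 + 1], st.2.1 ++ [((PySem.List.pyGetD cs i ' ').toNat : Int) - 48], st.2.2 + 1)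
      else (st.1 ++ [(0 : Int)], st.2.1, st.2.2))
    (([] : List Int), ([] : List Int), (0 : Int))
    = (rnk cs 0, nzd cs, (cnt cs : Int)) := by
  have h := PySem.List.foldl_pyRange_zero_pyGetD' cs ' '
    (fun (st : List Int × List Int × Int) ch =>
      if ch ≠ '0' then
        (st.1 ++ [st.2.2 + 1], st.2.1 ++ [(ch.toNat : Int) - 48], st.2.2 + 1)
      else (st.1 ++ [(0 : Int)], st.2.1, st.2.2))
    (([] : List Int), ([] : List Int), (0 : Int))
  refine h.trans ?_
  rw [loop1_gen]
  simp

-- loop 2: characterization of (V, S, pow10)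
theorem loop2_inv (D : List Int) (k : Nat) (hk : k ≤ D.length) :
    (PySem.List.pyRange 1 ((k : Int) + 1) 1).foldl (fun (st : List Int × List Int × List Int) i =>
      (st.1 ++ [PySem.Int.mod (PySem.List.pyGetD st.1 (i - 1) 0 * 10 + PySem.List.pyGetD D (i - 1) 0) (10 ^ 9 + 7)],
       st.2.1 ++ [PySem.List.pyGetD st.2.1 (i - 1) 0 + PySem.List.pyGetD D (i - 1) 0],
       st.2.2 ++ [PySem.Int.mod (PySem.List.pyGetD st.2.2 (i - 1) 0 * 10) (10 ^ 9 + 7)]))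
    ([(0 : Int)], [(0 : Int)], [(1 : Int)])
    = ((List.range (k + 1)).map (fun j => Ff 0 (D.take j)),
       (List.range (k + 1)).map (fun j => (D.take j).sum),
       (List.range (k + 1)).map (fun j => 10 ^ j % (10 ^ 9 + 7))) := by
  induction k with
  | zero =>
    rw [show ((0 : Nat) : Int) + 1 = 1 from by norm_num, PySem.List.pyRange_one_eq_nil le_rfl]
    simp [Ff]
  | succ k ih =>
    have hk' : k ≤ D.length := Nat.le_of_succ_le hk
    have hklt : k < D.length := hk
    rw [show (((k + 1 : Nat)) : Int) + 1 = ((k : Int) + 1) + 1 from by push_cast; ring,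
        PySem.List.pyRange_one_succ_right (by omega), List.foldl_append, ih hk',
        List.foldl_cons, List.foldl_nil]
    dsimp only
    have hD : D.getD k 0 = D[k] := List.getD_eq_getElem D 0 hklt
    have h1 : D.take (k + 1) = D.take k ++ [D[k]] := by
      rw [List.take_succ, List.getElem?_eq_getElem hklt]
      rfl
    have hV : (Ff 0 (D.take k) * 10 + D[k]) % (10 ^ 9 + 7) = Ff 0 (D.take (k + 1)) := by
      rw [h1, Ff_append]
      rfl
    have hS : (D.take k).sum + D[k] = (D.take (k + 1)).sum := by
      rw [h1, List.sum_append]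
      simp
    have hP : ((10 : Int) ^ k % (10 ^ 9 + 7) * 10) % (10 ^ 9 + 7) = (10 : Int) ^ (k + 1) % (10 ^ 9 + 7) := by
      conv_lhs => rw [Int.mul_emod, Int.emod_emod_of_dvd _ dvd_rfl]
      conv_rhs => rw [pow_succ, Int.mul_emod]
    rw [show (k : Int) + 1 - 1 = ((k : Nat) : Int) from by ring]
    rw [PySem.List.pyGetD_natCast, PySem.List.pyGetD_natCast, PySem.List.pyGetD_natCast,
        PySem.List.pyGetD_natCast]
    rw [PySem.List.getD_map_range (fun j => Ff 0 (D.take j)) (k + 1) k 0 (Nat.lt_succ_self k),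
        PySem.List.getD_map_range (fun j => (D.take j).sum) (k + 1) k 0 (Nat.lt_succ_self k),
        PySem.List.getD_map_range (fun j => 10 ^ j % (10 ^ 9 + 7)) (k + 1) k 0 (Nat.lt_succ_self k),
        hD, PySem.Int.mod_eq_emod_of_pos (by norm_num), PySem.Int.mod_eq_emod_of_pos (by norm_num),
        hV, hS, hP]
    simp [List.range_succ]

-- loop 3: next_nz
theorem njS_len (cs : List Char) : njS cs cs.length = (cs.length : Int) := by
  simp [njS]
theorem njS_succ (cs : List Char) (k : Nat) (h : k < cs.length) :
    njS cs k = if cs[k] ≠ '0' then (k : Int) else njS cs (k + 1) := by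
  unfold njS
  rw [List.drop_eq_getElem_cons h, List.takeWhile_cons]
  by_cases hc : cs[k] = '0'
  · simp only [hc, decide_true, if_true, ne_eq, not_true_eq_false, if_false, List.length_cons]
    push_cast
    ring
  · simp [hc]
theorem loop3_inv (cs : List Char) (k : Nat) (hk : k ≤ cs.length) :
    (PySem.List.pyRange ((k : Int) - 1) (-1) (-1)).foldl (fun (st : List Int × Int) i =>
      ((if PySem.List.pyGetD cs i ' ' ≠ '0' then i else st.2) :: st.1,
       if PySem.List.pyGetD cs i ' ' ≠ '0' then i else st.2))
    ((List.range' k (cs.length - k)).map (njS cs), njS cs k)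
    = ((List.range cs.length).map (njS cs), njS cs 0) := by
  induction k with
  | zero =>
    rw [show ((0 : Nat) : Int) - 1 = -1 from by norm_num, PySem.List.pyRange_neg_one_eq_nil le_rfl]
    simp [List.range_eq_range']
  | succ k ih =>
    have hklt : k < cs.length := hk
    rw [show (((k + 1 : Nat)) : Int) - 1 = ((k : Nat) : Int) from by push_cast; ring,
        PySem.List.pyRange_neg_one_cons (by omega), List.foldl_cons, ← ih (le_of_lt hklt)]
    congr 1
    dsimp only
    have hlast : (if PySem.List.pyGetD cs ((k : Nat) : Int) ' ' ≠ '0' then ((k : Nat) : Int) else njS cs (k + 1)) = njS cs k := by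
      rw [PySem.List.pyGetD_natCast, List.getD_eq_getElem _ _ hklt, njS_succ cs k hklt]
    rw [hlast, show cs.length - k = (cs.length - (k + 1)) + 1 from by omega, List.range'_succ]
    simp

-- loop 4: prev_nz
theorem loop4_inv (cs : List Char) (k : Nat) (hk : k ≤ cs.length) :
    (PySem.List.pyRange 0 (k : Int) 1).foldl (fun (st : List Int × Int) i =>
      (st.1 ++ [if PySem.List.pyGetD cs i ' ' ≠ '0' then i else st.2],
       if PySem.List.pyGetD cs i ' ' ≠ '0' then i else st.2))
    (([] : List Int), (-1 : Int))
    = ((List.range k).map (fun i => pjS cs (i + 1)), pjS cs k) := by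
  induction k with
  | zero =>
    rw [show ((0 : Nat) : Int) = 0 from rfl, PySem.List.pyRange_one_eq_nil le_rfl]
    simp [pjS]
  | succ k ih =>
    have hklt : k < cs.length := hk
    have hpj : pjS cs (k + 1) = if cs[k] ≠ '0' then (k : Int) else pjS cs k := by
      unfold pjS
      rw [List.take_succ, List.getElem?_eq_getElem hklt]
      simp only [Option.toList_some, List.reverse_append, List.reverse_cons, List.reverse_nil,
        List.nil_append, List.singleton_append, List.takeWhile_cons]
      by_cases hc : cs[k] = '0'
      · simp only [hc, decide_true, if_true, ne_eq, not_true_eq_false, if_false, List.length_cons]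
        push_cast
        ring
      · simp [hc]
    rw [show (((k + 1 : Nat)) : Int) = ((k : Nat) : Int) + 1 from by push_cast; ring,
        PySem.List.pyRange_one_succ_right (by omega), List.foldl_append, ih (le_of_lt hklt),
        List.foldl_cons, List.foldl_nil]
    dsimp only
    have hlast : (if PySem.List.pyGetD cs ((k : Nat) : Int) ' ' ≠ '0' then ((k : Nat) : Int) else pjS cs k) = pjS cs (k + 1) := by
      rw [PySem.List.pyGetD_natCast, List.getD_eq_getElem _ _ hklt, hpj]
    rw [hlast, List.range_succ]
    simp

-- B's inner loop over a char list
def stepB (vs : Int × Int) (ch : Char) : Int × Int :=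
  if ch ≠ '0' then
    (PySem.Int.mod (vs.1 * 10 + ((ch.toNat : Int) - 48)) (10 ^ 9 + 7), vs.2 + ((ch.toNat : Int) - 48))
  else vs

theorem loopB_gen (xs : List Char) (v sm : Int) :
    xs.foldl stepB (v, sm) = (Ff v (nzd xs), sm + (nzd xs).sum) := by
  induction xs generalizing v sm with
  | nil => simp [Ff, nzd]
  | cons c cs ih =>
    by_cases h : c = '0'
    · rw [List.foldl_cons, show stepB (v, sm) c = (v, sm) from by simp [stepB, h], ih]
      simp [nzd, h]
    · rw [List.foldl_cons, show stepB (v, sm) c =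
          ((v * 10 + ((c.toNat : Int) - 48)) % (10 ^ 9 + 7), sm + ((c.toNat : Int) - 48)) from by
            simp [stepB, h, PySem.Int.mod_eq_emod_of_pos (by norm_num : (0:Int) < 10 ^ 9 + 7)], ih]
      have h2 : nzd (c :: cs) = ((c.toNat : Int) - 48) :: nzd cs := by simp [nzd, dig, h]
      simp [h2, Ff]
      ring

-- reduction of B's per-query index loop to a fold over the characters of s[l..r]
theorem B_inner (cs : List Char) (lN rN : Nat) (hr : rN < cs.length) :
    (PySem.List.pyRange (lN : Int) ((rN : Int) + 1) 1).foldl (fun (vs : Int × Int) i =>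
        if PySem.List.pyGetD cs i ' ' ≠ '0' then
          (PySem.Int.mod (vs.1 * 10 + (((PySem.List.pyGetD cs i ' ').toNat : Int) - 48)) (10 ^ 9 + 7),
           vs.2 + (((PySem.List.pyGetD cs i ' ').toNat : Int) - 48))
        else vs) ((0 : Int), (0 : Int))
    = (Ff 0 (nzd ((cs.take (rN + 1)).drop lN)), (nzd ((cs.take (rN + 1)).drop lN)).sum) := by
  have hlen : (cs.take (rN + 1)).length = rN + 1 := by
    rw [List.length_take]
    omega
  have h1 : (PySem.List.pyRange (lN : Int) ((rN : Int) + 1) 1).foldl (fun (vs : Int × Int) i =>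
        if PySem.List.pyGetD cs i ' ' ≠ '0' then
          (PySem.Int.mod (vs.1 * 10 + (((PySem.List.pyGetD cs i ' ').toNat : Int) - 48)) (10 ^ 9 + 7),
           vs.2 + (((PySem.List.pyGetD cs i ' ').toNat : Int) - 48))
        else vs) ((0 : Int), (0 : Int))
      = (PySem.List.pyRange (lN : Int) ((rN : Int) + 1) 1).foldl (fun (vs : Int × Int) i =>
          stepB vs (PySem.List.pyGetD (cs.take (rN + 1)) i ' ')) ((0 : Int), (0 : Int)) := by
    apply PySem.List.foldl_congr_mem
    intro acc x hx
    rw [PySem.List.mem_pyRange_one] at hx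
    have hx0 : 0 ≤ x := le_trans (Int.natCast_nonneg lN) hx.1
    obtain ⟨k, rfl⟩ : ∃ k : Nat, x = (k : Int) := ⟨x.toNat, (Int.toNat_of_nonneg hx0).symm⟩
    have hk : k < rN + 1 := by exact_mod_cast hx.2
    rw [PySem.List.pyGetD_natCast, PySem.List.pyGetD_natCast,
        List.getD_eq_getElem _ _ (by omega : k < cs.length),
        List.getD_eq_getElem _ _ (by rw [hlen]; omega : k < (cs.take (rN + 1)).length),
        List.getElem_take]
    simp [stepB]
  rw [h1]
  have h2 := PySem.List.foldl_pyRange_pyGetD' (cs.take (rN + 1)) ' ' stepB ((0 : Int), (0 : Int))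
      (a := (lN : Int)) (by positivity)
  rw [hlen] at h2
  push_cast at h2
  rw [Int.toNat_natCast] at h2
  rw [h2, loopB_gen]
  simp

-- all-zero segments
theorem cnt_zeros (xs : List Char) (h : ∀ c ∈ xs, c = '0') : cnt xs = 0 := by
  simp only [cnt, List.length_eq_zero_iff, List.filter_eq_nil_iff]
  intro a ha
  simp [h a ha]
theorem nzd_zeros (xs : List Char) (h : ∀ c ∈ xs, c = '0') : nzd xs = [] := by
  simp only [nzd, List.map_eq_nil_iff, List.filter_eq_nil_iff]
  intro a ha
  simp [h a ha]
theorem cnt_rev (xs : List Char) : cnt xs.reverse = cnt xs := by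
  simp [cnt, List.filter_reverse]
theorem take_takeWhile_zeros (ys : List Char) (n : Nat)
    (hn : n ≤ (ys.takeWhile (fun c => c = '0')).length) : ∀ c ∈ ys.take n, c = '0' := by
  intro c hc
  have h1 : ys.take n = (ys.takeWhile (fun c => c = '0')).take n := by
    conv_lhs => rw [← List.takeWhile_append_dropWhile (p := fun c => decide (c = '0')) (l := ys)]
    rw [List.take_append, Nat.sub_eq_zero_of_le hn, List.take_zero, List.append_nil]
  rw [h1] at hc
  have := List.mem_takeWhile_imp (List.mem_of_mem_take hc)
  simpa using this
theorem take_takeWhile_len (p : Char → Bool) (ys : List Char) :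
    ys.take ((ys.takeWhile p).length) = ys.takeWhile p := by
  induction ys with
  | nil => simp
  | cons c cs ih =>
    by_cases hc : p c
    · simp [List.takeWhile_cons, hc, ih]
    · simp [List.takeWhile_cons, hc]
theorem takeWhile_len_getElem (p : Char → Bool) (ys : List Char)
    (h : (ys.takeWhile p).length < ys.length) :
    p (ys[(ys.takeWhile p).length]'h) = false := by
  induction ys with
  | nil => simp at h
  | cons c cs ih =>
    by_cases hc : p c
    · have h' : (cs.takeWhile p).length < cs.length := by
        have := h
        simp [List.takeWhile_cons, hc] at this
        exact this
      have hg : (c :: cs)[((c :: cs).takeWhile p).length]'h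
          = cs[(cs.takeWhile p).length]'h' := by
        simp [List.takeWhile_cons, hc]
      rw [hg]
      exact ih h'
    · simp [List.takeWhile_cons, hc]
theorem getElem_at_takeWhile_len (ys : List Char)
    (h : (ys.takeWhile (fun c => c = '0')).length < ys.length) :
    ys[(ys.takeWhile (fun c => c = '0')).length]'h ≠ '0' := by
  have := takeWhile_len_getElem (fun c => decide (c = '0')) ys h
  simpa using this
theorem cnt_take_takeWhile_succ (ys : List Char)
    (h : (ys.takeWhile (fun c => c = '0')).length < ys.length) :
    cnt (ys.take ((ys.takeWhile (fun c => c = '0')).length + 1)) = 1 := by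
  have h1 : ys.take ((ys.takeWhile (fun c => c = '0')).length + 1)
      = ys.takeWhile (fun c => c = '0') ++ [ys[(ys.takeWhile (fun c => c = '0')).length]'h] := by
    rw [List.take_succ, List.getElem?_eq_getElem h, take_takeWhile_len]
    rfl
  rw [h1, cnt_append, cnt_zeros _ (fun c hc => by simpa using List.mem_takeWhile_imp hc)]
  simp [cnt, getElem_at_takeWhile_len ys h]

-- per-query equality
theorem query_eq (cs : List Char) (l r : Int) (h0 : 0 ≤ l) (h1 : l < (cs.length : Int)) (h2 : r < (cs.length : Int)) :
    (let start := PySem.List.pyGetD ((List.range cs.length).map (njS cs)) l 0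
     if start > r then (0 : Int)
     else
      let e := PySem.List.pyGetD ((List.range cs.length).map (fun i => pjS cs (i + 1))) r 0
      let a := PySem.List.pyGetD (rnk cs 0) start 0
      let b := PySem.List.pyGetD (rnk cs 0) e 0
      let len := b - a + 1
      let x := PySem.Int.mod (PySem.List.pyGetD ((List.range (cnt cs + 1)).map (fun j => Ff 0 ((nzd cs).take j))) b 0 -
        PySem.List.pyGetD ((List.range (cnt cs + 1)).map (fun j => Ff 0 ((nzd cs).take j))) (a - 1) 0 *
        PySem.List.pyGetD ((List.range (cnt cs + 1)).map (fun j => 10 ^ j % (10 ^ 9 + 7))) len 0) (10 ^ 9 + 7)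
      let ssum := PySem.List.pyGetD ((List.range (cnt cs + 1)).map (fun j => ((nzd cs).take j).sum)) b 0 -
        PySem.List.pyGetD ((List.range (cnt cs + 1)).map (fun j => ((nzd cs).take j).sum)) (a - 1) 0
      PySem.Int.mod (x * ssum) (10 ^ 9 + 7))
    = (let st := (PySem.List.pyRange l (r + 1) 1).foldl (fun (vs : Int × Int) i =>
        if PySem.List.pyGetD cs i ' ' ≠ '0' then
          (PySem.Int.mod (vs.1 * 10 + (((PySem.List.pyGetD cs i ' ').toNat : Int) - 48)) (10 ^ 9 + 7),
           vs.2 + (((PySem.List.pyGetD cs i ' ').toNat : Int) - 48))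
        else vs) ((0 : Int), (0 : Int))
       PySem.Int.mod (st.1 * st.2) (10 ^ 9 + 7)) := by
  have hmod : ∀ x : Int, PySem.Int.mod x (10 ^ 9 + 7) = x % (10 ^ 9 + 7) :=
    fun x => PySem.Int.mod_eq_emod_of_pos (by norm_num)
  dsimp only
  obtain ⟨lN, rfl⟩ : ∃ k : Nat, l = (k : Int) := ⟨l.toNat, (Int.toNat_of_nonneg h0).symm⟩
  have hlN : lN < cs.length := by exact_mod_cast h1
  rw [PySem.List.pyGetD_natCast ((List.range cs.length).map (njS cs)) lN 0,
      List.getD_eq_getElem _ _ (by simpa using hlN), List.getElem_map, List.getElem_range]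
  set z := ((cs.drop lN).takeWhile (fun c => c = '0')).length with hzdef
  have hnj : njS cs lN = (lN : Int) + (z : Int) := by
    simp only [njS, ← hzdef]
  by_cases hgt : njS cs lN > r
  · -- no nonzero digit in s[l..r]: both sides give 0
    rw [if_pos hgt]
    by_cases hlr : r < (lN : Int)
    · rw [PySem.List.pyRange_one_eq_nil (by omega : r + 1 ≤ (lN : Int))]
      simp [hmod]
    · push_neg at hlr
      obtain ⟨rN, rfl⟩ : ∃ k : Nat, r = (k : Int) :=
        ⟨r.toNat, (Int.toNat_of_nonneg (le_trans (Int.natCast_nonneg lN) hlr)).symm⟩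
      have hrN : rN < cs.length := by exact_mod_cast h2
      rw [B_inner cs lN rN hrN]
      have hall : ∀ c ∈ (cs.take (rN + 1)).drop lN, c = '0' := by
        intro c hc
        rw [List.drop_take] at hc
        refine take_takeWhile_zeros (cs.drop lN) (rN + 1 - lN) ?_ c hc
        rw [hnj] at hgt
        omega
      rw [nzd_zeros _ hall]
      simp [Ff]
  · -- the range contains a nonzero digit
    push_neg at hgt
    rw [if_neg (not_lt.mpr hgt)]
    rw [hnj] at hgt
    obtain ⟨rN, rfl⟩ : ∃ k : Nat, r = (k : Int) :=
      ⟨r.toNat, (Int.toNat_of_nonneg (le_trans (by positivity) hgt)).symm⟩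
    have hrN : rN < cs.length := by exact_mod_cast h2
    have hzr : lN + z ≤ rN := by exact_mod_cast hgt
    rw [B_inner cs lN rN hrN, hnj]
    set xs := cs.take (rN + 1) with hxs
    have hxlen : xs.length = rN + 1 := by rw [hxs, List.length_take]; omega
    rw [PySem.List.pyGetD_natCast ((List.range cs.length).map (fun i => pjS cs (i + 1))) rN 0,
        List.getD_eq_getElem _ _ (by simpa using hrN), List.getElem_map, List.getElem_range]
    set z' := (xs.reverse.takeWhile (fun c => c = '0')).length with hz'def
    have hpj : pjS cs (rN + 1) = (rN : Int) - (z' : Int) := by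
      simp only [pjS, ← hxs, ← hz'def]
      push_cast
      ring
    rw [hpj]
    -- the first nonzero character
    have hzdroplt : z < (cs.drop lN).length := by rw [List.length_drop]; omega
    have hstartlt : lN + z < cs.length := by omega
    have hg : (cs.drop lN)[z]'hzdroplt ≠ '0' :=
      getElem_at_takeWhile_len (cs.drop lN) (hzdef ▸ hzdroplt)
    have hchar : cs[lN + z]'hstartlt ≠ '0' := by
      rwa [List.getElem_drop] at hg
    have hstart_idx : PySem.List.pyGetD (rnk cs 0) ((lN : Int) + (z : Int)) 0
        = (cnt (cs.take (lN + z + 1)) : Int) := by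
      rw [show (lN : Int) + (z : Int) = ((lN + z : Nat) : Int) from by push_cast; ring,
          PySem.List.pyGetD_natCast, rnk_getD cs 0 (lN + z) hstartlt hchar]
      simp
    have hcnt_start : cnt (cs.take (lN + z + 1)) = cnt (cs.take lN) + 1 := by
      rw [show lN + z + 1 = lN + (z + 1) from by omega, List.take_add, cnt_append]
      have h1 := cnt_take_takeWhile_succ (cs.drop lN) (hzdef ▸ hzdroplt)
      rw [← hzdef] at h1
      rw [h1]
    -- the last nonzero character
    have hseg : xs.drop lN = (cs.drop lN).take (rN + 1 - lN) := by rw [hxs, List.drop_take]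
    have hcnt_seg : 1 ≤ cnt (xs.drop lN) := by
      have hlen3 : z < (xs.drop lN).length := by rw [hseg, List.length_take]; omega
      have hmem : (cs.drop lN)[z]'hzdroplt ∈ xs.drop lN := by
        have hv : (xs.drop lN)[z]'hlen3 = (cs.drop lN)[z]'hzdroplt := by
          simp only [hseg, List.getElem_take]
        rw [← hv]
        exact List.getElem_mem _
      have hmf : (cs.drop lN)[z]'hzdroplt ∈ (xs.drop lN).filter (fun c => c ≠ '0') :=
        List.mem_filter.2 ⟨hmem, by simpa using hg⟩
      have h9 := List.length_pos_of_mem hmf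
      show 1 ≤ ((xs.drop lN).filter (fun c => c ≠ '0')).length
      omega
    have htl : xs.take lN = cs.take lN := by
      rw [hxs, List.take_take, Nat.min_eq_left (by omega)]
    have hcnt_xs : cnt (xs.take lN) + cnt (xs.drop lN) = cnt xs := by
      rw [← cnt_append, List.take_append_drop]
    rw [htl] at hcnt_xs
    have hz'lt : z' < rN + 1 := by
      by_contra hc
      push_neg at hc
      have hall : ∀ c ∈ xs.reverse, c = '0' := by
        intro c hcm
        have hcm' : c ∈ xs.reverse.take z' := by
          rw [List.take_of_length_le (by rw [List.length_reverse, hxlen]; omega)]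
          exact hcm
        exact take_takeWhile_zeros xs.reverse z' (le_of_eq hz'def) c hcm'
      have hzero : cnt xs = 0 := by
        rw [← cnt_rev]
        exact cnt_zeros _ hall
      omega
    set endN := rN - z' with hendN
    have hend_cast : (rN : Int) - (z' : Int) = ((endN : Nat) : Int) := by
      rw [hendN]
      push_cast [Nat.cast_sub (by omega : z' ≤ rN)]
      ring
    have hrevlt : z' < xs.reverse.length := by rw [List.length_reverse, hxlen]; omega
    have hrevidx : xs.reverse[z']'hrevlt ≠ '0' :=
      getElem_at_takeWhile_len xs.reverse (hz'def ▸ hrevlt)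
    have hendxs : endN < xs.length := by rw [hxlen]; omega
    have hxend : xs[endN]'hendxs ≠ '0' := by
      rw [List.getElem_reverse] at hrevidx
      have hidx : xs.length - 1 - z' = endN := by rw [hxlen]; omega
      simp only [hidx] at hrevidx
      exact hrevidx
    have hendm : endN < cs.length := by omega
    have hcend : cs[endN]'hendm ≠ '0' := by
      have hv : xs[endN]'hendxs = cs[endN]'hendm := by
        simp only [hxs, List.getElem_take]
      rwa [hv] at hxend
    have hend_idx : PySem.List.pyGetD (rnk cs 0) ((rN : Int) - (z' : Int)) 0
        = (cnt (cs.take (endN + 1)) : Int) := by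
      rw [hend_cast, PySem.List.pyGetD_natCast, rnk_getD cs 0 endN hendm hcend]
      simp
    have hcnt_end : cnt (cs.take (endN + 1)) = cnt xs := by
      have ha1 : cs.take (endN + 1) = xs.take (endN + 1) := by
        rw [hxs, List.take_take, Nat.min_eq_left (by omega)]
      have ha2 : cnt (xs.take (endN + 1)) + cnt (xs.drop (endN + 1)) = cnt xs := by
        rw [← cnt_append, List.take_append_drop]
      have ha3 : cnt (xs.drop (endN + 1)) = 0 := by
        apply cnt_zeros
        intro c hcm
        have hcm' : c ∈ (xs.drop (endN + 1)).reverse := by simpa using hcm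
        rw [List.reverse_drop] at hcm'
        have hlen2 : xs.length - (endN + 1) = z' := by rw [hxlen]; omega
        rw [hlen2] at hcm'
        exact take_takeWhile_zeros xs.reverse z' (le_of_eq hz'def) c hcm'
      rw [ha1]
      omega
    rw [hstart_idx, hend_idx, hcnt_start, hcnt_end]
    set α := cnt (cs.take lN) with hα
    set β := cnt xs with hβ
    have hαβ : α + 1 ≤ β := by omega
    have hβcs : β ≤ cnt cs := by
      have : cnt (cs.take (rN + 1)) + cnt (cs.drop (rN + 1)) = cnt cs := by
        rw [← cnt_append, List.take_append_drop]
      rw [← hxs] at this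
      omega
    rw [show ((α + 1 : Nat) : Int) - 1 = (α : Int) from by push_cast; ring,
        show ((β : Nat) : Int) - ((α + 1 : Nat) : Int) + 1 = ((β - α : Nat) : Int) from by
          rw [Nat.cast_sub (by omega : α ≤ β)]; push_cast; ring]
    rw [PySem.List.pyGetD_natCast, PySem.List.pyGetD_natCast, PySem.List.pyGetD_natCast,
        PySem.List.pyGetD_natCast, PySem.List.pyGetD_natCast]
    rw [PySem.List.getD_map_range (fun j => Ff 0 ((nzd cs).take j)) (cnt cs + 1) β 0 (by omega),
        PySem.List.getD_map_range (fun j => Ff 0 ((nzd cs).take j)) (cnt cs + 1) α 0 (by omega),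
        PySem.List.getD_map_range (fun j => 10 ^ j % (10 ^ 9 + 7)) (cnt cs + 1) (β - α) 0 (by omega),
        PySem.List.getD_map_range (fun j => ((nzd cs).take j).sum) (cnt cs + 1) β 0 (by omega),
        PySem.List.getD_map_range (fun j => ((nzd cs).take j).sum) (cnt cs + 1) α 0 (by omega)]
    simp only [hmod]
    rw [x_eq (nzd cs) α β (by omega) (by rw [length_nzd]; exact hβcs)]
    -- identify the digit lists
    have hD1 : nzd cs = nzd xs ++ nzd (cs.drop (rN + 1)) := by
      conv_lhs => rw [← List.take_append_drop (rN + 1) cs]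
      rw [nzd_append, ← hxs]
    have hDxs : (nzd cs).take β = nzd xs := by
      rw [hD1]
      exact List.take_left' (by rw [length_nzd, hβ])
    have hxs_split : xs = cs.take lN ++ xs.drop lN := by
      conv_lhs => rw [← List.take_append_drop lN xs]
      rw [htl]
    have hsegsplit : nzd xs = nzd (cs.take lN) ++ nzd (xs.drop lN) := by
      conv_lhs => rw [hxs_split]
      rw [nzd_append]
    have hD2 : nzd cs = nzd (cs.take lN) ++ nzd (cs.drop lN) := by
      conv_lhs => rw [← List.take_append_drop lN cs]
      rw [nzd_append]
    have hDα : (nzd cs).take α = nzd (cs.take lN) := by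
      rw [hD2]
      exact List.take_left' (by rw [length_nzd, hα])
    have hdropeq : ((nzd cs).take β).drop α = nzd (xs.drop lN) := by
      rw [hDxs, hsegsplit]
      exact List.drop_left' (by rw [length_nzd, hα])
    have hsum : ((nzd cs).take β).sum - ((nzd cs).take α).sum = (nzd (xs.drop lN)).sum := by
      rw [hDxs, hDα, hsegsplit, List.sum_append]
      ring
    rw [hdropeq, hsum]
-- the query loops of both ports agree
theorem fold_queries (cs : List Char) (qs : List (Int × Int))
    (hq : ∀ q ∈ qs, 0 ≤ q.1 ∧ q.1 < (cs.length : Int) ∧ q.2 < (cs.length : Int)) (res : List Int) :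
    qs.foldl (fun res q =>
      let start := PySem.List.pyGetD ((List.range cs.length).map (njS cs)) q.1 0
      if start > q.2 then res ++ [(0 : Int)]
      else
        let e := PySem.List.pyGetD ((List.range cs.length).map (fun i => pjS cs (i + 1))) q.2 0
        let a := PySem.List.pyGetD (rnk cs 0) start 0
        let b := PySem.List.pyGetD (rnk cs 0) e 0
        let len := b - a + 1
        let x := PySem.Int.mod (PySem.List.pyGetD ((List.range (cnt cs + 1)).map (fun j => Ff 0 ((nzd cs).take j))) b 0 -
          PySem.List.pyGetD ((List.range (cnt cs + 1)).map (fun j => Ff 0 ((nzd cs).take j))) (a - 1) 0 *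
          PySem.List.pyGetD ((List.range (cnt cs + 1)).map (fun j => 10 ^ j % (10 ^ 9 + 7))) len 0) (10 ^ 9 + 7)
        let ssum := PySem.List.pyGetD ((List.range (cnt cs + 1)).map (fun j => ((nzd cs).take j).sum)) b 0 -
          PySem.List.pyGetD ((List.range (cnt cs + 1)).map (fun j => ((nzd cs).take j).sum)) (a - 1) 0
        res ++ [PySem.Int.mod (x * ssum) (10 ^ 9 + 7)]) res
    = qs.foldl (fun res q =>
        let st := (PySem.List.pyRange q.1 (q.2 + 1) 1).foldl (fun (vs : Int × Int) i =>
          if PySem.List.pyGetD cs i ' ' ≠ '0' then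
            (PySem.Int.mod (vs.1 * 10 + (((PySem.List.pyGetD cs i ' ').toNat : Int) - 48)) (10 ^ 9 + 7),
             vs.2 + (((PySem.List.pyGetD cs i ' ').toNat : Int) - 48))
          else vs) ((0 : Int), (0 : Int))
        res ++ [PySem.Int.mod (st.1 * st.2) (10 ^ 9 + 7)]) res := by
  induction qs generalizing res with
  | nil => rfl
  | cons q qs ih =>
    rw [List.foldl_cons, List.foldl_cons]
    refine Eq.trans (congrArg (fun acc => List.foldl _ acc qs) ?_)
      (ih (fun p hp => hq p (List.mem_cons_of_mem q hp)) _)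
    have hb := hq q List.mem_cons_self
    have hqe := query_eq cs q.1 q.2 hb.1 hb.2.1 hb.2.2
    dsimp only
    dsimp only at hqe
    by_cases hc : PySem.List.pyGetD ((List.range cs.length).map (njS cs)) q.1 0 > q.2
    · rw [if_pos hc] at hqe ⊢
      rw [← hqe]
    · rw [if_neg hc] at hqe ⊢
      rw [hqe]

-- ===== VERDICT (by name: the statement is the Claim_ definition above) =====
theorem sumAndMultiply_spec : Claim_equal_sumAndMultiply := by
  intro s queries hdom hpre
  show sumAndMultiply s queries = sumAndMultiply_alt s queries
  unfold sumAndMultiply sumAndMultiply_alt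
  dsimp only
  rw [loop1_eq]
  dsimp only
  rw [loop2_inv (nzd s.toList) (cnt s.toList) (le_of_eq (length_nzd s.toList).symm)]
  dsimp only
  rw [show (([] : List Int), ((s.toList.length : Nat) : Int))
      = ((List.range' s.toList.length (s.toList.length - s.toList.length)).map (njS s.toList),
         njS s.toList s.toList.length) from by rw [njS_len]; simp]
  rw [loop3_inv s.toList s.toList.length le_rfl]
  dsimp only
  rw [loop4_inv s.toList s.toList.length le_rfl]
  dsimp only
  exact fold_queries s.toList queries hpre []
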